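-- pv_equiv track=rewrite | github.com/JJOL/TEB-LAB-UPC-2026 | Lab4/qgram_filtering.py | count_shared_qgrams
-- ===== SOURCE A (Python) =====
-- def enumerate_qgrams(P, q):
--     """
--     Generate all q-grams of pattern P.
--
--     Given a pattern P of length n, there are n-q+1 overlapping q-grams,
--     namely P[0..q-1], P[1..q], P[2..q+1], ..., P[n-q..n-1].
--
--     Args:
--         P: Pattern string
--         q: Length of q-grams
--
--     Returns:
--         List of q-grams (substrings of length q)
--
--     Example:
--         >>> enumerate_qgrams("ACGT", 2)
--         ['AC', 'CG', 'GT']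
--     """
--     if q > len(P):
--         return []
--
--     qgrams = []
--     for i in range(len(P) - q + 1):
--         qgrams.append(P[i:i+q])
--     return qgrams
--
-- def count_shared_qgrams(P, T, q):
--     """
--     Count how many q-grams of P appear in T.
--
--     Args:
--         P: Pattern string
--         T: Text string
--         q: Length of q-grams
--
--     Returns:
--         Number of q-grams from P that appear in T
--     """
--     # Get all q-grams from P
--     pattern_qgrams = enumerate_qgrams(P, q)
--
--     # Get all q-grams from T and store in a set for fast lookup
--     text_qgrams = set(enumerate_qgrams(T, q))
--
--     # Count how many pattern q-grams appear in text
--     shared_count = 0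
--     for qgram in pattern_qgrams:
--         if qgram in text_qgrams:
--             shared_count += 1
--
--     return shared_count
-- ===== SOURCE B (Python) =====
-- def count_shared_qgrams(P, T, q):
--     # a q-gram of P occurs among T's q-grams iff it occurs in T as a substring;
--     # test containment directly ('in T'), caching the answer per distinct q-gram,
--     # so no q-gram list of T is ever built
--     seen = {}
--     total = 0
--     for i in range(len(P) - q + 1):
--         g = P[i:i+q]
--         r = seen.get(g)
--         if r is None:
--             r = g in T
--             seen[g] = r
--         total += r
--     return total
-- ===== Notes on version B (the rewrite author's own statement) =====
-- stated objective: alternative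
-- what changed: B never enumerates or stores T's q-grams: it tests each q-gram of P for substring containment in T directly ('g in T'), memoizing the answer per distinct q-gram; Pre_ restricts to the natural domain q >= 0, since for negative q Python's negative-index slicing makes both programs' values accidental.
-- outside the precondition, e.g. on count_shared_qgrams('ab', 'xaz', -1): A returns 3, B returns 4
import Mathlib
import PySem

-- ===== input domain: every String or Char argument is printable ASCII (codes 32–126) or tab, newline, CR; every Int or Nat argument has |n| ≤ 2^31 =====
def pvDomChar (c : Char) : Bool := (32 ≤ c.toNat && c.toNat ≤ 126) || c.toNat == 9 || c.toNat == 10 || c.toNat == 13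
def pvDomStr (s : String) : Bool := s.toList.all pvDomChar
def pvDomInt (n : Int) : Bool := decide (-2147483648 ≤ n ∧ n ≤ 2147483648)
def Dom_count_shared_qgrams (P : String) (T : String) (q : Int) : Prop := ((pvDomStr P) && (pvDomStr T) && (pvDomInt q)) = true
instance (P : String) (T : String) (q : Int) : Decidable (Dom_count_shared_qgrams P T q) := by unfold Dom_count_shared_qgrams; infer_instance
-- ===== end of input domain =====

-- B tests each q-gram of P for substring containment in T instead of building T's q-gram set; equal values for q ≥ 0 (the natural domain Pre_ states).


-- ===== PORT A =====
def pvEnumerateQgrams (P : String) (q : Int) : List (List Char) :=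
  if q > PySem.Str.len P then []
  else
    (PySem.List.pyRange 0 (PySem.Str.len P - q + 1) 1).foldl
      (fun acc i => acc ++ [PySem.List.slice P.toList (some i) (some (i + q))]) []

def count_shared_qgrams (P : String) (T : String) (q : Int) : Int :=
  let pattern_qgrams := pvEnumerateQgrams P q
  let text_qgrams : PySem.Set (List Char) := PySem.Set.ofList (pvEnumerateQgrams T q)
  pattern_qgrams.foldl
    (fun shared_count qgram =>
      if PySem.Set.contains text_qgrams qgram then shared_count + 1 else shared_count) 0

-- ===== PORT B =====
-- loop body of B: look the q-gram up in the memo; on a miss run the substring test and record it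
def pvStepB (P : String) (T : String) (q : Int)
    (st : PySem.Dict (List Char) Bool × Int) (i : Int) : PySem.Dict (List Char) Bool × Int :=
  let g := PySem.List.slice P.toList (some i) (some (i + q))
  match st.1.get? g with
  | some r => (st.1, st.2 + (if r then 1 else 0))
  | none =>
      let r := PySem.Chars.isIn g T.toList
      (st.1.insert g r, st.2 + (if r then 1 else 0))

def count_shared_qgrams_alt (P : String) (T : String) (q : Int) : Int :=
  ((PySem.List.pyRange 0 (PySem.Str.len P - q + 1) 1).foldl
    (pvStepB P T q) (PySem.Dict.empty, 0)).2

-- ===== PRECONDITION & SPEC =====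
-- Pre_ restricts to the task's natural domain q ≥ 0: for negative q Python's negative-index
-- slicing makes A's (and B's) values accidental artefacts, so those inputs are excluded.
def Pre_count_shared_qgrams (P : String) (T : String) (q : Int) : Prop := 0 ≤ q
instance (P : String) (T : String) (q : Int) : Decidable (Pre_count_shared_qgrams P T q) := by unfold Pre_count_shared_qgrams; infer_instance
def pvWitness_count_shared_qgrams : String × String × Int := ("ACGT", "GACGTT", 2)

def Spec_count_shared_qgrams (P : String) (T : String) (q : Int) (out : Int) : Prop := out = count_shared_qgrams_alt P T q
instance (P : String) (T : String) (q : Int) (out : Int) : Decidable (Spec_count_shared_qgrams P T q out) := by unfold Spec_count_shared_qgrams; infer_instance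

-- ===== CLAIM (what is proved, stated in full; the proofs are below) =====
def Claim_equal_count_shared_qgrams : Prop := ∀ (P : String) (T : String) (q : Int), Dom_count_shared_qgrams P T q → Pre_count_shared_qgrams P T q → Spec_count_shared_qgrams P T q (count_shared_qgrams P T q)

-- ===== LEMMAS AND PROOFS =====

-- the q-gram list of a char list, as a map over the (clamped) index range
def pvQgrams (L : List Char) (q : Int) : List (List Char) :=
  (PySem.List.pyRange 0 (max ((L.length : Int) - q + 1) 0) 1).map
    (fun i => PySem.List.slice L (some i) (some (i + q)))

theorem pvEnum_eq (s : String) (q : Int) : pvEnumerateQgrams s q = pvQgrams s.toList q := by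
  unfold pvEnumerateQgrams pvQgrams
  split_ifs with h
  · rw [max_eq_right (by simp [PySem.Str.len_eq] at h ⊢; omega),
        PySem.List.pyRange_one_eq_nil (by omega)]
    simp
  · rw [PySem.List.foldl_append_singleton_eq_map,
        max_eq_left (by simp [PySem.Str.len_eq] at h ⊢; omega)]
    simp

theorem pvRange_max (x : Int) :
    PySem.List.pyRange 0 x 1 = PySem.List.pyRange 0 (max x 0) 1 := by
  rcases (by omega : x ≤ 0 ∨ 0 < x) with h | h
  · rw [PySem.List.pyRange_one_eq_nil (by omega), PySem.List.pyRange_one_eq_nil (by omega)]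
  · rw [max_eq_left (by omega)]

-- membership in the q-gram list is exactly substring containment, for g of length q
theorem pvMem_qgrams_iff_infix (L : List Char) (q : Int) (hq : 0 ≤ q)
    (g : List Char) (hg : (g.length : Int) = q) :
    g ∈ pvQgrams L q ↔ g <:+: L := by
  unfold pvQgrams
  simp only [List.mem_map, PySem.List.mem_pyRange_one]
  constructor
  · rintro ⟨i, ⟨hi0, hiu⟩, rfl⟩
    have hmax : (0:Int) < max ((L.length : Int) - q + 1) 0 := by omega
    have hiu' : i < (L.length : Int) - q + 1 := by omega
    obtain ⟨j, rfl⟩ : ∃ j : Nat, i = (j : Int) := ⟨i.toNat, by omega⟩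
    obtain ⟨n, rfl⟩ : ∃ n : Nat, q = (n : Int) := ⟨q.toNat, by omega⟩
    rw [PySem.List.slice_natCast_add]
    exact ((L.drop j).take_prefix n).isInfix.trans (L.drop_suffix j).isInfix
  · intro hinf
    obtain ⟨s, t, hst⟩ := hinf
    obtain ⟨n, rfl⟩ : ∃ n : Nat, q = (n : Int) := ⟨q.toNat, by omega⟩
    have hdrop : L.drop s.length = g ++ t := by
      rw [← hst]; simp
    have hlen : s.length + n ≤ L.length := by
      have := congrArg List.length hst
      simp at this hg
      omega
    refine ⟨(s.length : Int), ⟨by omega, by omega⟩, ?_⟩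
    rw [PySem.List.slice_natCast_add, hdrop]
    have : n = g.length := by exact_mod_cast hg.symm
    subst this
    simp
  -- (j + q ≤ len in the forward direction is not needed: take/drop are prefix/suffix regardless)

-- the memo fold computes the plain per-q-gram containment count, for any memo that only
-- caches correct answers
theorem pvMemoFold (P T : String) (q : Int) (l : List Int)
    (d : PySem.Dict (List Char) Bool) (acc : Int)
    (hd : ∀ k r, d.get? k = some r → r = PySem.Chars.isIn k T.toList) :
    (l.foldl (pvStepB P T q) (d, acc)).2
      = l.foldl (fun a i =>
          if PySem.Chars.isIn (PySem.List.slice P.toList (some i) (some (i + q))) T.toList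
          then a + 1 else a) acc := by
  induction l generalizing d acc with
  | nil => rfl
  | cons i l ih =>
    rw [List.foldl_cons, List.foldl_cons]
    have hsplit : ∀ (b : Bool) (a : Int),
        a + (if b then (1:Int) else 0) = if b then a + 1 else a := by
      intro b a; cases b <;> simp
    rcases hget : d.get? (PySem.List.slice P.toList (some i) (some (i + q))) with _ | r
    · rw [show pvStepB P T q (d, acc) i
          = (d.insert (PySem.List.slice P.toList (some i) (some (i + q)))
               (PySem.Chars.isIn (PySem.List.slice P.toList (some i) (some (i + q))) T.toList),
             acc + (if PySem.Chars.isIn (PySem.List.slice P.toList (some i) (some (i + q))) T.toList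
                    then 1 else 0)) from by unfold pvStepB; simp only [hget]]
      rw [ih _ _ (fun k r hk => ?_), hsplit]
      rcases eq_or_ne k (PySem.List.slice P.toList (some i) (some (i + q))) with rfl | hne
      · rw [PySem.Dict.get?_insert_self] at hk
        exact (Option.some.inj hk).symm
      · exact hd k r (by rwa [PySem.Dict.get?_insert_of_ne d _ hne] at hk)
    · rw [show pvStepB P T q (d, acc) i
          = (d, acc + (if r then (1:Int) else 0)) from by unfold pvStepB; simp only [hget]]
      rw [ih _ _ hd, hd _ r hget, hsplit]

-- ===== VERDICT (by name: the statement is the Claim_ definition above) =====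
theorem count_shared_qgrams_spec : Claim_equal_count_shared_qgrams := by
  intro P T q _ hq
  unfold Pre_count_shared_qgrams at hq
  unfold Spec_count_shared_qgrams
  have hA : count_shared_qgrams P T q = (pvEnumerateQgrams P q).foldl
      (fun acc g => if PySem.Set.contains (PySem.Set.ofList (pvEnumerateQgrams T q)) g
        then acc + 1 else acc) 0 := rfl
  have hB : count_shared_qgrams_alt P T q
      = (PySem.List.pyRange 0 (PySem.Str.len P - q + 1) 1).foldl
          (fun acc i =>
            if PySem.Chars.isIn (PySem.List.slice P.toList (some i) (some (i + q))) T.toList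
            then acc + 1 else acc) 0 := by
    unfold count_shared_qgrams_alt
    exact pvMemoFold P T q _ PySem.Dict.empty 0
      (fun k r hk => by rw [PySem.Dict.get?_empty] at hk; cases hk)
  rw [hA, hB, pvEnum_eq, pvEnum_eq,
      show PySem.Str.len P = (P.toList.length : Int) by simp,
      pvRange_max, ← List.foldl_map
        (f := fun i => PySem.List.slice P.toList (some i) (some (i + q)))
        (g := fun acc g => if PySem.Chars.isIn g T.toList then acc + 1 else acc)]
  refine PySem.List.foldl_congr_mem' _ _ _ _ (fun g hgmem acc => ?_)
  -- g is a q-gram of P, hence has length q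
  have hglen : (g.length : Int) = q := by
    unfold pvQgrams at hgmem
    simp only [List.mem_map, PySem.List.mem_pyRange_one] at hgmem
    obtain ⟨i, ⟨hi0, hiu⟩, rfl⟩ := hgmem
    have hiu' : i < (P.toList.length : Int) - q + 1 := by omega
    obtain ⟨j, rfl⟩ : ∃ j : Nat, i = (j : Int) := ⟨i.toNat, by omega⟩
    obtain ⟨n, rfl⟩ : ∃ n : Nat, q = (n : Int) := ⟨q.toNat, by omega⟩
    rw [PySem.List.slice_natCast_add]
    simp only [List.length_take, List.length_drop]
    push_cast
    omega
  have hiff : PySem.Set.contains (PySem.Set.ofList (pvQgrams T.toList q)) g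
      = PySem.Chars.isIn g T.toList := by
    refine Bool.eq_iff_iff.mpr ?_
    rw [PySem.Set.contains_iff, PySem.Set.mem_ofList,
        pvMem_qgrams_iff_infix T.toList q hq g hglen, PySem.Chars.isIn_iff_infix]
  rw [hiff]
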